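-- pv_equiv track=rewrite | github.com/jsai28/ReusableBDD | analysis_funcs.py | true_clusters
-- ===== SOURCE A (Python) =====
-- def true_clusters(test_data):
--     clusters = {}
--     for test in test_data:
--         feature_file = test["feature_file"]
--         test_case = test["test_case"]
--         if feature_file not in clusters:
--             clusters[feature_file] = []
--
--         clusters[feature_file].append(test_case)
--
--     return clusters
-- ===== SOURCE B (Python) =====
-- def true_clusters(test_data):
--     # collect distinct feature files in first-occurrence order, then one
--     # filtering pass per feature file (instead of a single accumulating dict)
--     order = []
--     seen = set()
--     for test in test_data:
--         f = test["feature_file"]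
--         if f not in seen:
--             seen.add(f)
--             order.append(f)
--     return {f: [t["test_case"] for t in test_data
--                if t["feature_file"] == f]
--             for f in order}
-- ===== Notes on version B (the rewrite author's own statement) =====
-- stated objective: alternative
-- what changed: A builds the grouping in one pass by appending into a dict of lists; B first collects the distinct feature files in first-occurrence order and then makes one filtering pass over test_data per feature file, assembling the result with a dict comprehension.
import Mathlib
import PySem

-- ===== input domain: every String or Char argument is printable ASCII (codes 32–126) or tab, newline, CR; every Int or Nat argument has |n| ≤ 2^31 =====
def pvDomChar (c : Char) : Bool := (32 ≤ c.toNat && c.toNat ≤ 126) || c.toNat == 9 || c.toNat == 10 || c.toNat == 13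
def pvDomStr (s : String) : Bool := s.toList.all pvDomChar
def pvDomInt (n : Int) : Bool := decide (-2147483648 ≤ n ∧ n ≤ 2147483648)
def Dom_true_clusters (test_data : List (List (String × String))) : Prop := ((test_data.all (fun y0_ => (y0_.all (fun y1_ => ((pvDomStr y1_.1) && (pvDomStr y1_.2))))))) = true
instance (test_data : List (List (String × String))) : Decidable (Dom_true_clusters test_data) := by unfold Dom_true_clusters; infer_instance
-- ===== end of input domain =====

-- B groups by collecting the distinct feature files first and then filtering the data
-- once per feature file, instead of A's single pass appending into a dict of lists.

-- ===== PORT A =====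
-- dict lookup test[k] (each test is a Python dict; none = KeyError, excluded by Pre_)
def pvGetA (t : List (String × String)) (k : String) : Option String :=
  (PySem.Dict.ofList t).get? k

def true_clusters (test_data : List (List (String × String))) : List (String × List String) :=
  (test_data.foldl (fun clusters test =>
      match pvGetA test "feature_file", pvGetA test "test_case" with
      | some ff, some tc =>
          let c := if clusters.contains ff then clusters else clusters.insert ff []
          c.modify ff [] (fun l => l ++ [tc])
      | _, _ => clusters)  -- KeyError in Python: outside Pre_
    PySem.Dict.empty).items

-- ===== PORT B =====
-- dict lookup t[k] for B (none = KeyError, excluded by Pre_)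
def pvGetB (t : List (String × String)) (k : String) : Option String :=
  (PySem.Dict.ofList t).get? k

def true_clusters_alt (test_data : List (List (String × String))) : List (String × List String) :=
  let order : PySem.Set String :=
    test_data.foldl (fun s test =>
        match pvGetB test "feature_file" with
        | some f => PySem.Set.add s f
        | none => s)  -- KeyError in Python: outside Pre_
      PySem.Set.empty
  order.map (fun f =>
    (f, test_data.filterMap (fun t =>
          match pvGetB t "feature_file" with
          | some ff => if ff == f then pvGetB t "test_case" else none
          | none => none)))  -- KeyError in Python: outside Pre_

-- ===== PRECONDITION & SPEC =====
-- Pre_: every test dict has both the "feature_file" and the "test_case" key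
-- (otherwise both A and B raise KeyError).
def Pre_true_clusters (test_data : List (List (String × String))) : Prop :=
  (test_data.all (fun t =>
    (PySem.Dict.ofList t).contains "feature_file" &&
    (PySem.Dict.ofList t).contains "test_case")) = true
instance (test_data : List (List (String × String))) : Decidable (Pre_true_clusters test_data) := by
  unfold Pre_true_clusters; infer_instance

def pvWitness_true_clusters : (List (List (String × String))) :=
  [[("feature_file", "a.feature"), ("test_case", "t1")],
   [("feature_file", "b.feature"), ("test_case", "t2")],
   [("feature_file", "a.feature"), ("test_case", "t3")]]

def Spec_true_clusters (test_data : List (List (String × String))) (out : List (String × List String)) : Prop := out = true_clusters_alt test_data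
instance (test_data : List (List (String × String))) (out : List (String × List String)) : Decidable (Spec_true_clusters test_data out) := by unfold Spec_true_clusters; infer_instance

-- ===== CLAIM (what is proved, stated in full; the proofs are below) =====
def Claim_equal_true_clusters : Prop := ∀ (test_data : List (List (String × String))), Dom_true_clusters test_data → Pre_true_clusters test_data → Spec_true_clusters test_data (true_clusters test_data)

-- ===== LEMMAS AND PROOFS =====

def pvGet (t : List (String × String)) (k : String) : Option String :=
  (PySem.Dict.ofList t).get? k

@[simp] lemma pvGetA_eq (t : List (String × String)) (k : String) : pvGetA t k = pvGet t k := rfl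
@[simp] lemma pvGetB_eq (t : List (String × String)) (k : String) : pvGetB t k = pvGet t k := rfl

-- the (feature_file, test_case) pairs, defined whenever Pre_ holds
def pvPairs (test_data : List (List (String × String))) : List (String × String) :=
  test_data.map (fun t => ((pvGet t "feature_file").getD "", (pvGet t "test_case").getD ""))

-- A's loop body equals a plain modify
lemma step_eq_modify (d : PySem.Dict String (List String)) (ff tc : String) :
    ((if d.contains ff then d else d.insert ff []).modify ff [] (fun l => l ++ [tc]))
      = d.modify ff [] (fun l => l ++ [tc]) := by
  by_cases h : d.contains ff
  · simp [h]
  · have hif : (if d.contains ff = true then d else d.insert ff []) = d.insert ff [] := by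
      simp [h]
    rw [hif]
    simp only [PySem.Dict.modify]
    rw [PySem.Dict.getD_insert_self, PySem.Dict.insert_insert_self,
        PySem.Dict.getD_of_not_contains d [] (by simpa using h)]

lemma pre_mem {test_data : List (List (String × String))}
    (hpre : Pre_true_clusters test_data) {t : List (String × String)} (ht : t ∈ test_data) :
    pvGet t "feature_file" = some ((pvGet t "feature_file").getD "") ∧
    pvGet t "test_case" = some ((pvGet t "test_case").getD "") := by
  unfold Pre_true_clusters at hpre
  rw [List.all_eq_true] at hpre
  have := hpre t ht
  simp only [Bool.and_eq_true] at this
  have h1 := this.1; have h2 := this.2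
  rw [PySem.Dict.contains_eq_isSome_get?] at h1 h2
  unfold pvGet
  cases e1 : (PySem.Dict.ofList t).get? "feature_file" with
  | none => rw [e1] at h1; simp at h1
  | some a =>
    cases e2 : (PySem.Dict.ofList t).get? "test_case" with
    | none => rw [e2] at h2; simp at h2
    | some b => simp

-- A reduces to the canonical grouping over the pairs list
lemma portA_eq (test_data : List (List (String × String)))
    (hpre : Pre_true_clusters test_data) :
    true_clusters test_data =
      (PySem.List.dedup ((pvPairs test_data).map Prod.fst)).map
        (fun f => (f, ((pvPairs test_data).filter (fun p => p.1 == f)).map (fun p => p.2))) := by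
  unfold true_clusters
  have hfold :
      test_data.foldl (fun clusters test =>
        match pvGetA test "feature_file", pvGetA test "test_case" with
        | some ff, some tc =>
            let c := if clusters.contains ff then clusters else clusters.insert ff []
            c.modify ff [] (fun l => l ++ [tc])
        | _, _ => clusters) PySem.Dict.empty
      = (pvPairs test_data).foldl
          (fun d p => d.modify p.1 [] (fun l => l ++ [p.2])) PySem.Dict.empty := by
    unfold pvPairs
    rw [List.foldl_map]
    apply PySem.List.foldl_congr_mem
    intro acc t ht
    obtain ⟨h1, h2⟩ := pre_mem hpre ht
    rw [pvGetA_eq, pvGetA_eq, h1, h2]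
    exact step_eq_modify acc _ _
  rw [hfold]
  set ps := pvPairs test_data with hps
  have hnd : ((ps.foldl (fun d p => d.modify p.1 [] (fun l => l ++ [p.2]))
      PySem.Dict.empty)).keys.Nodup := by
    exact PySem.Dict.nodup_keys_foldl_modify_key ps Prod.fst []
      (fun _ p => fun l => l ++ [p.2]) PySem.Dict.empty (by simp [PySem.Dict.keys_empty])
  rw [PySem.Dict.items_eq_map_keys _ hnd []]
  have hkeys : ((ps.foldl (fun d p => d.modify p.1 [] (fun l => l ++ [p.2]))
      PySem.Dict.empty)).keys = PySem.List.dedup (ps.map Prod.fst) := by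
    rw [PySem.Dict.keys_foldl_modify_key ps Prod.fst [] (fun _ p => fun l => l ++ [p.2])]
    simp [PySem.Dict.keys_empty, PySem.Set.update_nil_left]
  rw [hkeys]
  apply List.map_congr_left
  intro f _
  congr 1
  exact PySem.Dict.getD_foldl_modify_append ps PySem.Dict.empty f

-- B's key collection reduces to dedup of the feature files
lemma portB_keys (test_data : List (List (String × String)))
    (hpre : Pre_true_clusters test_data) :
    test_data.foldl (fun s test =>
        match pvGetB test "feature_file" with
        | some f => PySem.Set.add s f
        | none => s) PySem.Set.empty
      = PySem.List.dedup ((pvPairs test_data).map Prod.fst) := by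
  have h : test_data.foldl (fun s test =>
        match pvGetB test "feature_file" with
        | some f => PySem.Set.add s f
        | none => s) PySem.Set.empty
      = (pvPairs test_data).foldl (fun s p => PySem.Set.add s p.1) PySem.Set.empty := by
    unfold pvPairs
    rw [List.foldl_map]
    apply PySem.List.foldl_congr_mem
    intro acc t ht
    rw [pvGetB_eq, (pre_mem hpre ht).1]
    simp
  rw [h, ← PySem.Set.update_map_eq_foldl_add]
  simp [PySem.Set.empty, PySem.Set.update_nil_left]

-- B's inner filtering pass reduces to filter+map over the pairs list
lemma portB_group (test_data : List (List (String × String)))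
    (hpre : Pre_true_clusters test_data) (f : String) :
    test_data.filterMap (fun t =>
        match pvGetB t "feature_file" with
        | some ff => if ff == f then pvGetB t "test_case" else none
        | none => none)
      = ((pvPairs test_data).filter (fun p => p.1 == f)).map (fun p => p.2) := by
  induction test_data with
  | nil => simp [pvPairs]
  | cons t rest ih =>
    simp only [pvGetB_eq] at ih
    have hpre' : Pre_true_clusters rest := by
      unfold Pre_true_clusters at hpre ⊢
      simp only [List.all_cons, Bool.and_eq_true] at hpre
      exact hpre.2
    obtain ⟨h1, h2⟩ := pre_mem hpre (List.mem_cons_self ..)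
    simp only [pvPairs, List.map_cons, List.filterMap_cons, List.filter_cons, pvGetB_eq]
    rw [h1]
    simp only [Option.getD_some]
    by_cases hf : ((pvGet t "feature_file").getD "") == f
    · simp only [hf, if_true]
      rw [h2, ih hpre']
      simp [pvPairs]
    · simp only [Bool.not_eq_true] at hf
      simp only [hf, Bool.false_eq_true, if_false]
      rw [ih hpre']
      simp [pvPairs]

-- ===== VERDICT (by name: the statement is the Claim_ definition above) =====
theorem true_clusters_spec : Claim_equal_true_clusters := by
  intro test_data _ hpre
  unfold Spec_true_clusters
  rw [portA_eq test_data hpre]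
  unfold true_clusters_alt
  rw [portB_keys test_data hpre]
  apply List.map_congr_left
  intro f _
  rw [portB_group test_data hpre f]
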